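-- pv_equiv track=rewrite | github.com/TheRealAsciiMan/Chiffrement | poly_py.py | text_to_bin_encoded
-- ===== SOURCE A (Python) =====
-- def text_to_bin_encoded(message, cle):
--     cle = cle * (len(message) // len(cle)) + cle[:len(message) % len(cle)]
--     resultat = ""
--     for i in range(len(message)):
--         ascii_message = ord(message[i])
--         ascii_cle = ord(cle[i])
--         binaire_message = format(ascii_message, '08b')
--         binaire_cle = format(ascii_cle, '08b')
--         for j in range(8):
--             resultat += str(int(binaire_message[j]) ^ int(binaire_cle[j]))
--     return resultat
-- ===== SOURCE B (Python) =====
-- def text_to_bin_encoded(message, cle):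
--     pieces = []
--     for i, ch in enumerate(message):
--         pieces.append(format(ord(ch) ^ ord(cle[i % len(cle)]), '08b'))
--     return "".join(pieces)
-- ===== Notes on version B (the rewrite author's own statement) =====
-- stated objective: faster
-- what changed: B drops A's key-repetition preprocessing and the inner 8-iteration bit-string XOR loop: it indexes the key with i % len(cle), XORs the two code points as integers, formats each result with format(x, '08b'), and joins the pieces at the end.
import Mathlib
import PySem

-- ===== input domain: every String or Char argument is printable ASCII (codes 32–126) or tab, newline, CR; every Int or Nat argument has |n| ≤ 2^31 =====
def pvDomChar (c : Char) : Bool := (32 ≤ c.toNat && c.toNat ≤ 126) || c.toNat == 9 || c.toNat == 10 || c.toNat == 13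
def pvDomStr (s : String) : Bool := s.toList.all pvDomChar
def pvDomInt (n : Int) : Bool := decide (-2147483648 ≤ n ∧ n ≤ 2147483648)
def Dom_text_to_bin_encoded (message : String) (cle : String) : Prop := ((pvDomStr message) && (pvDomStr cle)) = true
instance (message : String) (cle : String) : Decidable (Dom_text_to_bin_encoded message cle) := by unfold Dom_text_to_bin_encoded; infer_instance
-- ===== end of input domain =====

-- B replaces A's key repetition + per-bit string XOR by modulo key indexing and one integer XOR
-- with format(x, '08b') per character, joined at the end (a measured constant-factor speedup; same return value).

-- format(n, '08b'): big-endian 8-bit binary digit string; hand port, exact for 0 ≤ n < 256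
-- (every argument here is an XOR of two code points ≤ 126). Used by both ports (both Pythons call it).
def pvFmt08b (n : Int) : List Char :=
  (List.range 8).map (fun j => if n.toNat.testBit (7 - j) then '1' else '0')

-- int(c) for a one-character binary digit string c: hand port, exact on '0'/'1'
-- (the only characters format '08b' produces).
def pvDigit (c : Char) : Int := if c = '1' then 1 else 0

-- ===== PORT A =====
def text_to_bin_encoded (message : String) (cle : String) : String :=
  let m := message.toList
  let k := cle.toList
  -- cle = cle * (len(message) // len(cle)) + cle[:len(message) % len(cle)]
  -- (Nat division/mod of the nonnegative lengths; k = [] is Python's ZeroDivisionError, excluded by Pre_)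
  let k2 := (List.replicate (m.length / k.length) k).flatten ++ k.take (m.length % k.length)
  let res := (List.range m.length).foldl (fun resultat i =>
    let asciiMessage : Int := (m.getD i ' ').toNat      -- ord(message[i]), i in range
    let asciiCle : Int := (k2.getD i ' ').toNat         -- ord(cle[i]), i in range under Pre_
    let binaireMessage := pvFmt08b asciiMessage
    let binaireCle := pvFmt08b asciiCle
    (List.range 8).foldl (fun r j =>
      r ++ PySem.Int.toChars
        (PySem.Int.bxor (pvDigit (binaireMessage.getD j ' ')) (pvDigit (binaireCle.getD j ' ')))) resultat) []
  String.mk res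

-- ===== PORT B =====
def text_to_bin_encoded_alt (message : String) (cle : String) : String :=
  let m := message.toList
  let k := cle.toList
  let pieces := (PySem.List.enumerate m).foldl (fun ps p =>
    ps ++ [pvFmt08b (PySem.Int.bxor ((p.2.toNat : Int))
      (((PySem.List.pyGetD k (PySem.Int.mod p.1 (k.length : Int)) ' ').toNat : Int)))]) []
  String.mk (PySem.Chars.join [] pieces)

-- ===== PRECONDITION & SPEC =====
-- A divides by len(cle): an empty key raises ZeroDivisionError, so Pre_ excludes exactly cle = "".
def Pre_text_to_bin_encoded (message : String) (cle : String) : Prop := cle ≠ ""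
instance (message : String) (cle : String) : Decidable (Pre_text_to_bin_encoded message cle) := by
  unfold Pre_text_to_bin_encoded; infer_instance
def pvWitness_text_to_bin_encoded : String × String := ("ab", "k")

def Spec_text_to_bin_encoded (message : String) (cle : String) (out : String) : Prop :=
  out = text_to_bin_encoded_alt message cle
instance (message : String) (cle : String) (out : String) : Decidable (Spec_text_to_bin_encoded message cle out) := by
  unfold Spec_text_to_bin_encoded; infer_instance

-- ===== CLAIM (what is proved, stated in full; the proofs are below) =====
def Claim_equal_text_to_bin_encoded : Prop := ∀ (message : String) (cle : String),
  Dom_text_to_bin_encoded message cle → Pre_text_to_bin_encoded message cle →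
  Spec_text_to_bin_encoded message cle (text_to_bin_encoded message cle)

-- ===== LEMMAS AND PROOFS =====

theorem pv_bxor_natCast (a b : Nat) : PySem.Int.bxor (a : Int) (b : Int) = ((a ^^^ b : Nat) : Int) := by
  simp [PySem.Int.bxor]

theorem pv_fmt_getD (n : Int) (j : Nat) (hj : j < 8) :
    (pvFmt08b n).getD j ' ' = if n.toNat.testBit (7 - j) then '1' else '0' := by
  unfold pvFmt08b
  rw [List.getD_eq_getElem _ _ (by simpa using hj)]
  simp

theorem pv_bitchar (a b : Nat) (j : Nat) (hj : j < 8) :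
    PySem.Int.toChars
      (PySem.Int.bxor (pvDigit ((pvFmt08b (a : Int)).getD j ' ')) (pvDigit ((pvFmt08b (b : Int)).getD j ' ')))
    = [if ((a ^^^ b : Nat) : Int).toNat.testBit (7 - j) then '1' else '0'] := by
  rw [pv_fmt_getD _ _ hj, pv_fmt_getD _ _ hj]
  simp only [Int.toNat_natCast, Nat.testBit_xor]
  rcases Bool.eq_false_or_eq_true (a.testBit (7 - j)) with h1 | h1 <;>
    rcases Bool.eq_false_or_eq_true (b.testBit (7 - j)) with h2 | h2 <;>
      simp only [h1, h2] <;> decide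

-- A's inner 8-step loop appends exactly format(a ^ b, '08b').
theorem pv_inner8 (a b : Nat) (r0 : List Char) :
    (List.range 8).foldl (fun r j =>
      r ++ PySem.Int.toChars
        (PySem.Int.bxor (pvDigit ((pvFmt08b (a : Int)).getD j ' ')) (pvDigit ((pvFmt08b (b : Int)).getD j ' ')))) r0
    = r0 ++ pvFmt08b ((a ^^^ b : Nat) : Int) := by
  rw [PySem.List.foldl_congr_mem _ _
      (fun r j => r ++ [if ((a ^^^ b : Nat) : Int).toNat.testBit (7 - j) then '1' else '0']) r0 ?_]
  · rw [PySem.List.foldl_append_singleton_eq_map]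
    rfl
  · intro acc j hj
    rw [List.mem_range] at hj
    rw [pv_bitchar a b j hj]

-- Indexing a q-fold repetition of k is indexing k modulo its length.
theorem pv_cyc (k : List Char) (d : Char) :
    ∀ (q i : Nat), i < q * k.length →
      ((List.replicate q k).flatten).getD i d = k.getD (i % k.length) d := by
  intro q
  induction q with
  | zero => intro i hi; simp at hi
  | succ q ih =>
    intro i hi
    have hmul : (q + 1) * k.length = q * k.length + k.length := by ring
    rw [hmul] at hi
    rw [List.replicate_succ, List.flatten_cons]
    by_cases hik : i < k.length
    · rw [List.getD_append _ _ _ _ hik, Nat.mod_eq_of_lt hik]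
    · push_neg at hik
      rw [List.getD_append_right _ _ _ _ hik, Nat.mod_eq_sub_mod hik]
      exact ih (i - k.length) (by omega)

-- A's rebuilt key string, indexed below len(message), is k[i % len k].
theorem pv_k2idx (k : List Char) (hk : k ≠ []) (n i : Nat) (hi : i < n) (d : Char) :
    (((List.replicate (n / k.length) k).flatten ++ k.take (n % k.length))).getD i d
    = k.getD (i % k.length) d := by
  have hL : 0 < k.length := List.length_pos_iff.mpr hk
  have hfl : (List.replicate (n / k.length) k).flatten.length = n / k.length * k.length := by
    simp [List.length_flatten, List.sum_replicate, Nat.mul_comm]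
  have hdm : n / k.length * k.length + n % k.length = n := by
    rw [Nat.mul_comm]; exact Nat.div_add_mod n k.length
  have hmlt : n % k.length < k.length := Nat.mod_lt _ hL
  by_cases hlt : i < n / k.length * k.length
  · rw [List.getD_append _ _ _ _ (by omega), pv_cyc k d _ _ hlt]
  · push_neg at hlt
    have hj : i - n / k.length * k.length < n % k.length := by omega
    have hmod : i % k.length = i - n / k.length * k.length := by
      conv_lhs => rw [show i = (i - n / k.length * k.length) + n / k.length * k.length by omega]
      rw [Nat.add_mul_mod_self_right, Nat.mod_eq_of_lt (by omega)]
    have hjl : i - n / k.length * k.length < (List.take (n % k.length) k).length := by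
      rw [List.length_take]; exact Nat.lt_min.mpr ⟨hj, by omega⟩
    rw [List.getD_append_right _ _ _ _ (by omega), hfl, List.getD_eq_getElem _ _ hjl,
        List.getElem_take, ← List.getD_eq_getElem (d := d) k (by omega), hmod]

-- ''.join on List Char pieces is flatten.
theorem pv_join_nil_flatten : ∀ (ps : List (List Char)), PySem.Chars.join [] ps = ps.flatten := by
  intro ps
  induction ps with
  | nil => simp [PySem.Chars.join_nil]
  | cons p ps ih =>
    cases ps with
    | nil => simp [PySem.Chars.join_singleton]
    | cons q rest =>
      rw [PySem.Chars.join_cons_cons]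
      simp only [List.flatten_cons]
      rw [ih]
      simp

-- ===== VERDICT (by name: the statement is the Claim_ definition above) =====
theorem text_to_bin_encoded_spec : Claim_equal_text_to_bin_encoded := by
  intro message cle hdom hpre
  unfold Spec_text_to_bin_encoded text_to_bin_encoded text_to_bin_encoded_alt
  simp only []
  set m := message.toList with hm
  set k := cle.toList with hk
  have hkne : k ≠ [] := fun h => hpre (String.toList_eq_nil_iff.mp (hk ▸ h))
  congr 1
  -- A side: each outer-loop step appends format(ord(m[i]) ^ ord(k[i % len k]), '08b')
  rw [PySem.List.foldl_congr_mem _ _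
      (fun resultat i => resultat ++
        pvFmt08b (((m.getD i ' ').toNat ^^^ (k.getD (i % k.length) ' ').toNat : Nat) : Int)) []
      ?_]
  · rw [PySem.List.foldl_append_eq_flatMap, List.nil_append]
    -- B side
    rw [PySem.List.foldl_append_singleton_eq_map, List.nil_append, pv_join_nil_flatten,
        ← List.flatMap_def]
    rw [PySem.List.enumerate_eq_map_pyRange (d := ' '), List.flatMap_map]
    simp only [PySem.List.len]
    rw [PySem.List.pyRange_zero_nat, List.flatMap_map]
    apply List.flatMap_congr
    intro i hi
    rw [List.mem_range] at hi
    simp only [PySem.Int.mod_natCast, PySem.List.pyGetD_natCast, pv_bxor_natCast]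
  · intro acc i hi
    rw [List.mem_range] at hi
    rw [pv_k2idx k hkne m.length i hi ' ']
    exact pv_inner8 _ _ acc
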